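-- pv_equiv track=rewrite | github.com/sphildreth/decentdb | benchmarks/python_embedded_compare/run.py | _lcg_ids
-- ===== SOURCE A (Python) =====
-- from typing import Any, Dict, Iterable, List, Optional, Sequence, Tuple
--
-- def _lcg_ids(n: int, modulo: int, seed: int = 0xC0FFEE) -> List[int]:
--     # Deterministic pseudo-random ids in [1..modulo]
--     a = 1664525
--     c = 1013904223
--     m = 2**32
--     x = seed & 0xFFFFFFFF
--     out: List[int] = []
--     for _ in range(n):
--         x = (a * x + c) % m
--         out.append((x % modulo) + 1)
--     return out
-- ===== SOURCE B (Python) =====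
-- from typing import List
--
-- def _lcg_ids(n: int, modulo: int, seed: int = 0xC0FFEE) -> List[int]:
--     # Closed form of the LCG: x_k = (a^k * x0 + c * (a^k - 1)/(a - 1)) mod 2^32.
--     # Each id is computed independently from one modular exponentiation
--     # pow(a, k, (a-1)*m), which yields both a^k mod m (since m divides (a-1)*m)
--     # and the exact geometric sum (a^k - 1)/(a - 1) mod m; no state is threaded.
--     a, c, m = 1664525, 1013904223, 2 ** 32
--     x0 = seed & 0xFFFFFFFF
--     M = (a - 1) * m
--     out: List[int] = []
--     for k in range(1, n + 1):
--         p = pow(a, k, M)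
--         out.append(((p % m * x0 + c * ((p - 1) // (a - 1))) % m % modulo) + 1)
--     return out
-- ===== Notes on version B (the rewrite author's own statement) =====
-- stated objective: alternative
-- what changed: Replaced the sequential LCG state-recurrence loop by the closed form x_k = (a^k*x0 + c*(a^k-1)/(a-1)) mod 2^32: every id is computed independently by modular exponentiation (pow(a,k,m), with the geometric sum obtained exactly via pow(a,k,(a-1)*m)), so no state is threaded between iterations.
import Mathlib
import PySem

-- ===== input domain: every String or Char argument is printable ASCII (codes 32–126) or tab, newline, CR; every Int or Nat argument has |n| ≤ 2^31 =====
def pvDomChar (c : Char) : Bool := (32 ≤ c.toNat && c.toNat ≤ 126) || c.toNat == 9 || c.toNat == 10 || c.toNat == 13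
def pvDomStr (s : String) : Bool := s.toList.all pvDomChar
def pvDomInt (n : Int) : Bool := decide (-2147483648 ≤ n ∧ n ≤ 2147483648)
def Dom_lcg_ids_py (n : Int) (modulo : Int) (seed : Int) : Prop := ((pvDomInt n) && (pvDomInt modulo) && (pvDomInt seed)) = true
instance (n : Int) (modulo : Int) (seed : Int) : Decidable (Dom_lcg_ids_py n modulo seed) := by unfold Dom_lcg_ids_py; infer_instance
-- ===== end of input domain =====

-- B replaces A's sequential state-recurrence loop by the LCG closed form
-- x_k = (a^k*x0 + c*(a^k-1)/(a-1)) mod 2^32, computing every id independently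
-- by modular exponentiation (objective: alternative algorithm, not faster).

-- ===== PORT A =====
-- A: single loop threading the LCG state x and appending one id per step.
def lcg_ids_py (n : Int) (modulo : Int) (seed : Int) : List Int :=
  let x0 := PySem.Int.band seed 0xFFFFFFFF
  ((PySem.List.pyRange 0 n 1).foldl
    (fun (st : Int × List Int) _ =>
      let x := PySem.Int.mod (1664525 * st.1 + 1013904223) 4294967296
      (x, st.2 ++ [PySem.Int.mod x modulo + 1]))
    (x0, [])).2

-- ===== PORT B =====
-- B: closed form; for each k in range(1, n+1) one modular power p = pow(a,k,(a-1)*m)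
-- yields the k-th state directly as (p % m * x0 + c * ((p-1) // (a-1))) % m.
def lcg_ids_py_alt (n : Int) (modulo : Int) (seed : Int) : List Int :=
  let x0 := PySem.Int.band seed 0xFFFFFFFF
  (PySem.List.pyRange 1 (n + 1) 1).foldl (fun out k =>
    let p := PySem.Int.powMod 1664525 k.toNat (1664524 * 4294967296)
    out ++ [PySem.Int.mod
      (PySem.Int.mod
        (PySem.Int.mod p 4294967296 * x0 +
          1013904223 * PySem.Int.floordiv (p - 1) 1664524)
        4294967296)
      modulo + 1]) []

-- ===== PRECONDITION & SPEC =====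
-- Pre_ excludes exactly the inputs where Python raises ZeroDivisionError: modulo == 0 with at least one iteration.
def Pre_lcg_ids_py (n : Int) (modulo : Int) (seed : Int) : Prop := n ≤ 0 ∨ modulo ≠ 0
instance (n : Int) (modulo : Int) (seed : Int) : Decidable (Pre_lcg_ids_py n modulo seed) := by unfold Pre_lcg_ids_py; infer_instance
def pvWitness_lcg_ids_py : Int × Int × Int := (3, 10, 0)

def Spec_lcg_ids_py (n : Int) (modulo : Int) (seed : Int) (out : List Int) : Prop := out = lcg_ids_py_alt n modulo seed
instance (n : Int) (modulo : Int) (seed : Int) (out : List Int) : Decidable (Spec_lcg_ids_py n modulo seed out) := by unfold Spec_lcg_ids_py; infer_instance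

-- ===== CLAIM (what is proved, stated in full; the proofs are below) =====
def Claim_equal_lcg_ids_py : Prop := ∀ (n : Int) (modulo : Int) (seed : Int), Dom_lcg_ids_py n modulo seed → Pre_lcg_ids_py n modulo seed → Spec_lcg_ids_py n modulo seed (lcg_ids_py n modulo seed)

-- ===== LEMMAS AND PROOFS =====

-- the iterated LCG state (proof-side helper)
def lcgIter : Nat → Int → Int
  | 0, x => x
  | k + 1, x => PySem.Int.mod (1664525 * lcgIter k x + 1013904223) 4294967296

-- the geometric sum 1 + a + … + a^(k-1), recursively
def lcgGeo : Nat → Int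
  | 0 => 0
  | k + 1 => 1664525 * lcgGeo k + 1

theorem lcgGeo_mul (k : Nat) : 1664524 * lcgGeo k = 1664525 ^ k - 1 := by
  induction k with
  | zero => simp [lcgGeo]
  | succ k ih => simp only [lcgGeo, pow_succ]; ring_nf; ring_nf at ih; omega

-- (a * (y % m) + c) % m = (a * y + c) % m
theorem step_emod (a c m y : Int) :
    (a * (y % m) + c) % m = (a * y + c) % m := by
  conv_lhs => rw [Int.add_emod, Int.mul_emod, Int.emod_emod_of_dvd _ dvd_rfl,
    ← Int.mul_emod, ← Int.add_emod]

-- closed form of the iteration (for at least one step)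
theorem lcgIter_closed (k : Nat) (x : Int) :
    lcgIter (k + 1) x =
      (1664525 ^ (k + 1) * x + 1013904223 * lcgGeo (k + 1)) % 4294967296 := by
  induction k with
  | zero =>
      show PySem.Int.mod _ _ = _
      rw [PySem.Int.mod_eq_emod_of_pos (by norm_num)]
      norm_num [lcgIter, lcgGeo]
  | succ k ih =>
      show PySem.Int.mod (1664525 * lcgIter (k + 1) x + 1013904223) 4294967296 = _
      rw [PySem.Int.mod_eq_emod_of_pos (by norm_num), ih, step_emod]
      congr 1
      simp only [lcgGeo, pow_succ]
      ring

-- the geometric sum recovered from pow(a, k, (a-1)*m), modulo m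
theorem lcgGeo_pow_trick (k : Nat) :
    PySem.Int.floordiv (PySem.Int.mod (1664525 ^ k) (1664524 * 4294967296) - 1) 1664524
      % 4294967296 = lcgGeo k % 4294967296 := by
  rw [PySem.Int.mod_eq_emod_of_pos (by norm_num),
    PySem.Int.floordiv_eq_ediv_of_pos (by norm_num)]
  have hq := Int.mul_ediv_add_emod (1664525 ^ k) (1664524 * 4294967296)
  have hDG := lcgGeo_mul k
  have hr : 1664525 ^ k % (1664524 * 4294967296) - 1 =
      1664524 * (lcgGeo k - 4294967296 * (1664525 ^ k / (1664524 * 4294967296))) := by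
    omega
  rw [hr, Int.mul_ediv_cancel_left _ (by norm_num)]
  have : lcgGeo k - 4294967296 * (1664525 ^ k / (1664524 * 4294967296)) =
      lcgGeo k + 4294967296 * (-(1664525 ^ k / (1664524 * 4294967296))) := by ring
  rw [this, Int.add_mul_emod_self_left]

-- B's per-index state equals the iterated state
theorem bstate_eq (k : Nat) (x : Int) :
    PySem.Int.mod
      (PySem.Int.mod (PySem.Int.powMod 1664525 (k + 1) (1664524 * 4294967296)) 4294967296 * x +
        1013904223 *
          PySem.Int.floordiv
            (PySem.Int.powMod 1664525 (k + 1) (1664524 * 4294967296) - 1) 1664524)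
      4294967296 = lcgIter (k + 1) x := by
  simp only [PySem.Int.powMod]
  rw [lcgIter_closed]
  simp only [PySem.Int.mod_eq_emod_of_pos (show (0:Int) < 4294967296 by norm_num)]
  rw [PySem.Int.mod_eq_emod_of_pos (show (0:Int) < 1664524 * 4294967296 by norm_num)]
  have hg := lcgGeo_pow_trick (k + 1)
  rw [PySem.Int.mod_eq_emod_of_pos (show (0:Int) < 1664524 * 4294967296 by norm_num)] at hg
  rw [Int.emod_emod_of_dvd _ (show (4294967296:Int) ∣ 1664524 * 4294967296 from ⟨1664524, by norm_num⟩)]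
  conv_lhs => rw [Int.add_emod, Int.mul_emod, Int.emod_emod_of_dvd _ dvd_rfl,
    Int.mul_emod 1013904223, hg]
  conv_rhs => rw [Int.add_emod, Int.mul_emod (1664525 ^ (k + 1)),
    Int.mul_emod 1013904223]

-- iterating from the first step's result shifts the index
theorem lcgIter_shift (k : Nat) (x : Int) :
    lcgIter k (PySem.Int.mod (1664525 * x + 1013904223) 4294967296) =
      lcgIter (k + 1) x := by
  induction k with
  | zero => rfl
  | succ k ih => show PySem.Int.mod (1664525 * lcgIter k _ + _) _ = _; rw [ih]; rfl

-- A's fold appends exactly the mapped iterated states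
theorem foldA (modulo : Int) (l : List Int) (x : Int) (acc : List Int) :
    ((l.foldl
      (fun (st : Int × List Int) _ =>
        let y := PySem.Int.mod (1664525 * st.1 + 1013904223) 4294967296
        (y, st.2 ++ [PySem.Int.mod y modulo + 1]))
      (x, acc)).2)
    = acc ++ (List.range l.length).map
        (fun i => PySem.Int.mod (lcgIter (i + 1) x) modulo + 1) := by
  induction l generalizing x acc with
  | nil => simp
  | cons a t ih =>
      simp only [List.foldl_cons]
      rw [ih]
      simp only [List.length_cons, List.range_succ_eq_map, List.map_cons,
        List.map_map, List.append_assoc, List.singleton_append]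
      congr 2
      congr 1
      funext i
      simp only [Function.comp]
      rw [lcgIter_shift]

-- ===== VERDICT (by name: the statement is the Claim_ definition above) =====
theorem lcg_ids_py_spec : Claim_equal_lcg_ids_py := by
  intro n modulo seed _ _
  unfold Spec_lcg_ids_py lcg_ids_py lcg_ids_py_alt
  rw [foldA]
  rw [PySem.List.foldl_append_singleton_eq_map]
  rw [PySem.List.pyRange_one 0 n, PySem.List.pyRange_one 1 (n + 1)]
  simp only [List.length_map, List.length_range, List.map_map, List.nil_append,
    Int.sub_zero, Int.add_sub_cancel]
  congr 1
  funext i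
  show PySem.Int.mod (lcgIter (i + 1) _) modulo + 1 = _
  have ht : ((1 : Int) + (i : Nat)).toNat = i + 1 := by omega
  simp only [Function.comp, ht]
  rw [bstate_eq]
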